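-- pv_equiv track=rewrite | github.com/andrei10t/AdventOfCode | AdventOfCode2020/day6.py | processInput2
-- ===== SOURCE A (Python) =====
-- def processInput2(input) -> list:
--     result = list()
--     biglist = list()
--     l = list()
--     for line in input:
--         if not line:
--             biglist.append(l)
--             l = list()
--         else:
--             l.append(line)
--
--     for l in biglist:
--         s = set()
--         for char in l[0]:
--             allyes = True
--             for string in l:
--                 if char not in string:
--                     allyes = False
--             if allyes:
--                 s.add(char)
--         result.append(s)
--     return result
-- ===== SOURCE B (Python) =====
-- def processInput2(input) -> list:
--     # One pass: keep a running intersection of the current group's character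
--     # sets; a blank line flushes it to the result.  (On a group with no lines
--     # -- a blank line at the start or right after another blank -- A raises
--     # IndexError; such inputs are outside Pre_.)
--     result = []
--     inter = None
--     for line in input:
--         if not line:
--             result.append(inter)
--             inter = None
--         elif inter is None:
--             inter = set(line)
--         else:
--             inter &= set(line)
--     return result
-- ===== Notes on version B (the rewrite author's own statement) =====
-- stated objective: simpler
-- what changed: A first builds the full list of groups and then runs a triple nested loop (for each char of the group's first line, rescan every line of the group with a substring test); B is a single pass over the input that keeps one running set-intersection per group and flushes it at each blank line. Pre_ excludes inputs with an empty group (a blank line first or right after another blank), on which A raises IndexError at l[0].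
import Mathlib
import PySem

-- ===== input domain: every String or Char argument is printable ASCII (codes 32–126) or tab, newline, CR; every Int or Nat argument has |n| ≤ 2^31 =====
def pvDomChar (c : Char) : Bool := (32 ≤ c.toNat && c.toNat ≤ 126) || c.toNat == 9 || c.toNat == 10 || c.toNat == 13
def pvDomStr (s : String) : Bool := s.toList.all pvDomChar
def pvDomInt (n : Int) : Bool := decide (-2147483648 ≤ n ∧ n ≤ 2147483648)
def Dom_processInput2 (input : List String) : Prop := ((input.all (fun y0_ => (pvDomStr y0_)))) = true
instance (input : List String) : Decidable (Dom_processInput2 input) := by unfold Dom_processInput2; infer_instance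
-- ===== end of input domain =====

-- B replaces A's two-phase grouping + triple nested membership loop by a single pass
-- that keeps a running set-intersection per group (simpler; return value identical on Pre_).


-- ===== PORT A =====
-- a 1-character Python string (what 'for char in l[0]' yields)
def pvOne (c : Char) : String := String.ofList [c]

-- A's grouping step: a blank line flushes the current group l into biglist
def pvAStep (st : List (List String) × List String) (line : String) :
    List (List String) × List String :=
  if line = "" then (st.1 ++ [st.2], []) else (st.1, st.2 ++ [line])

-- A's inner loops for one group l: for char in l[0]: allyes-scan over l, then s.add(char).
-- On an empty group Python raises IndexError at l[0] (excluded by Pre_); there the match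
-- gives no characters to iterate.
def pvGroupA (l : List String) : PySem.Set String :=
  (match PySem.List.pyGet? l 0 with | some h => h.toList | none => []).foldl
    (fun (s : PySem.Set String) c =>
      let allyes := l.foldl
        (fun (allyes : Bool) str => if !(PySem.Str.isIn (pvOne c) str) then false else allyes)
        true
      if allyes then PySem.Set.add s (pvOne c) else s)
    PySem.Set.empty

def processInput2 (input : List String) : List (List String) :=
  let st := input.foldl pvAStep ([], [])
  st.1.foldl (fun (result : List (List String)) l => result ++ [pvGroupA l]) []

-- ===== PORT B =====
-- set(line)
def pvCharSet (line : String) : PySem.Set String :=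
  PySem.Set.ofList (line.toList.map pvOne)

-- B's single-pass step; st.2 is None | the running intersection of the current group.
-- Python B appends None on an empty group (only reachable outside Pre_, where A raises);
-- None is not representable in List (List String), so the port appends the empty set there.
def pvBStep (st : List (List String) × Option (PySem.Set String)) (line : String) :
    List (List String) × Option (PySem.Set String) :=
  if line = "" then
    (st.1 ++ [match st.2 with | some s => s | none => PySem.Set.empty], none)
  else
    match st.2 with
    | none => (st.1, some (pvCharSet line))
    | some s => (st.1, some (PySem.Set.inter s (pvCharSet line)))

def processInput2_alt (input : List String) : List (List String) :=
  (input.foldl pvBStep ([], none)).1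

-- ===== PRECONDITION & SPEC =====
-- Pre_ excludes inputs with an empty answer group (a blank line first, or one right after
-- another blank line): there Python A raises IndexError at l[0].
def Pre_processInput2 (input : List String) : Prop :=
  input.head? ≠ some "" ∧ ∀ p ∈ input.zip input.tail, p.2 = "" → p.1 ≠ ""
instance (input : List String) : Decidable (Pre_processInput2 input) := by
  unfold Pre_processInput2; infer_instance
def pvWitness_processInput2 : List String := ["ab", "b", "", "bc", ""]

def Spec_processInput2 (input : List String) (out : List (List String)) : Prop := out = processInput2_alt input
instance (input : List String) (out : List (List String)) : Decidable (Spec_processInput2 input out) := by unfold Spec_processInput2; infer_instance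

-- ===== CLAIM (what is proved, stated in full; the proofs are below) =====
def Claim_equal_processInput2 : Prop := ∀ (input : List String), Dom_processInput2 input → Pre_processInput2 input → Spec_processInput2 input (processInput2 input)

-- ===== LEMMAS AND PROOFS =====

-- proof-side state: b tracks whether the current group is still empty;
-- a blank line demands a nonempty current group
def pvNoEmpty : Bool → List String → Prop
  | _, [] => True
  | b, line :: rest => if line = "" then b = false ∧ pvNoEmpty true rest else pvNoEmpty false rest

-- the running intersection B keeps while consuming the lines of a group
def pvIacc (o : Option (PySem.Set String)) (g : List String) : Option (PySem.Set String) :=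
  g.foldl
    (fun o line =>
      match o with
      | none => some (pvCharSet line)
      | some s => some (PySem.Set.inter s (pvCharSet line)))
    o

theorem pvOne_inj {c d : Char} (h : pvOne c = pvOne d) : c = d := by
  have := congrArg String.toList h
  simpa [pvOne] using this

theorem pvIsIn_one (c : Char) (s : String) :
    PySem.Str.isIn (pvOne c) s = true ↔ c ∈ s.toList := by
  rw [PySem.Str.isIn_iff_infix]
  simp [pvOne, List.singleton_infix_iff]

theorem pvMem_map_one (c : Char) (l : List Char) : pvOne c ∈ l.map pvOne ↔ c ∈ l := by
  constructor
  · rintro h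
    obtain ⟨a, ha, hev⟩ := List.mem_map.mp h
    exact (pvOne_inj hev.symm) ▸ ha
  · intro h; exact List.mem_map.mpr ⟨c, h, rfl⟩

theorem pvContains_charSet (c : Char) (line : String) :
    (pvCharSet line).contains (pvOne c) = PySem.Str.isIn (pvOne c) line := by
  rw [Bool.eq_iff_iff, pvIsIn_one]
  simp only [pvCharSet, PySem.Set.contains, ← PySem.List.dedup_eq_ofList,
    List.contains_iff_mem, PySem.List.mem_dedup]
  exact pvMem_map_one c line.toList

theorem pvAdd_filter (p : String → Bool) (acc : PySem.Set String) (x : String) :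
    (PySem.Set.add acc x).filter p =
      if p x then PySem.Set.add (acc.filter p) x else acc.filter p := by
  by_cases hm : x ∈ acc
  · have h1 : PySem.Set.add acc x = acc := by
      simp [PySem.Set.add, PySem.Set.contains, hm]
    by_cases hx : p x
    · have h2 : PySem.Set.add (acc.filter p) x = acc.filter p := by
        simp [PySem.Set.add, PySem.Set.contains, List.mem_filter, hm, hx]
      simp [h1, h2, hx]
    · simp [h1, hx]
  · have h1 : PySem.Set.add acc x = acc ++ [x] := by
      simp [PySem.Set.add, PySem.Set.contains, hm]
    by_cases hx : p x
    · have h2 : PySem.Set.add (acc.filter p) x = acc.filter p ++ [x] := by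
        simp [PySem.Set.add, PySem.Set.contains, List.mem_filter, hm]
      simp [h1, h2, hx, List.filter_append]
    · simp [h1, hx, List.filter_append]

theorem pvFoldlAdd_filter (p : String → Bool) (xs : List String) (acc : PySem.Set String) :
    (xs.foldl PySem.Set.add acc).filter p = (xs.filter p).foldl PySem.Set.add (acc.filter p) := by
  induction xs generalizing acc with
  | nil => rfl
  | cons x xs ih =>
    by_cases hx : p x
    · simp only [List.foldl_cons, ih, List.filter_cons, hx, if_true, pvAdd_filter,
        List.foldl_cons]
    · simp only [List.foldl_cons, ih, List.filter_cons, hx, pvAdd_filter, if_false,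
        Bool.false_eq_true]

theorem pvOfList_filter (p : String → Bool) (xs : List String) :
    PySem.Set.ofList (xs.filter p) = (PySem.Set.ofList xs).filter p := by
  simpa [PySem.Set.ofList, PySem.Set.empty] using (pvFoldlAdd_filter p xs []).symm

theorem pvInterFold (t : List String) (s : PySem.Set String) :
    t.foldl (fun s line => PySem.Set.inter s (pvCharSet line)) s =
      s.filter (fun x => t.all (fun line => (pvCharSet line).contains x)) := by
  induction t generalizing s with
  | nil => simp
  | cons line t ih =>
    rw [List.foldl_cons, ih]
    show List.filter _ (PySem.Set.inter s (pvCharSet line)) = _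
    rw [PySem.Set.inter, List.filter_filter]
    exact List.filter_congr (fun x _ => by simp [List.all_cons, Bool.and_comm])

theorem pvIacc_some (t : List String) (s : PySem.Set String) :
    pvIacc (some s) t =
      some (t.foldl (fun s line => PySem.Set.inter s (pvCharSet line)) s) := by
  induction t generalizing s with
  | nil => rfl
  | cons line t ih => simpa [pvIacc] using ih (PySem.Set.inter s (pvCharSet line))

theorem pvGroupA_cons (h : String) (t : List String) :
    pvGroupA (h :: t) =
      (pvCharSet h).filter
        (fun x => (h :: t).all (fun str => PySem.Str.isIn x str)) := by
  have hget : PySem.List.pyGet? (h :: t) (0 : Int) = some h := by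
    simp [PySem.List.pyGet?, PySem.List.pyIdx?]
  have hall : ∀ (c : Char) (l : List String),
      l.foldl (fun (allyes : Bool) str =>
        if !(PySem.Str.isIn (pvOne c) str) then false else allyes) true
      = l.all (fun str => PySem.Str.isIn (pvOne c) str) := by
    intro c l
    rw [PySem.List.foldl_if_false_eq]
    simp [List.all_eq_not_any_not]
  rw [pvGroupA]
  simp only [hget]
  simp only [hall]
  rw [PySem.List.foldl_if_eq_foldl_filter]
  show (h.toList.filter (fun c => (h :: t).all fun str => PySem.Str.isIn (pvOne c) str)).foldl
      (fun s c => PySem.Set.add s (pvOne c)) PySem.Set.empty = _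
  rw [← List.foldl_map (f := pvOne) (g := PySem.Set.add), ← PySem.Set.ofList]
  rw [show (fun c => (h :: t).all fun str => PySem.Str.isIn (pvOne c) str)
        = (fun x => (h :: t).all fun str => PySem.Str.isIn x str) ∘ pvOne from rfl]
  rw [← List.filter_map, pvOfList_filter, pvCharSet]

theorem pvMem_charSet (x : String) (h : String) (hx : x ∈ pvCharSet h) :
    ∃ c, c ∈ h.toList ∧ x = pvOne c := by
  simp only [pvCharSet, ← PySem.List.dedup_eq_ofList, PySem.List.mem_dedup] at hx
  obtain ⟨c, hc, rfl⟩ := List.mem_map.mp hx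
  exact ⟨c, hc, rfl⟩

theorem pvGroup_eq (h : String) (t : List String) :
    pvIacc none (h :: t) = some (pvGroupA (h :: t)) := by
  have h0 : pvIacc none (h :: t) = pvIacc (some (pvCharSet h)) t := rfl
  rw [h0, pvIacc_some, pvInterFold, pvGroupA_cons]
  congr 1
  apply List.filter_congr
  intro x hx
  obtain ⟨c, hc, rfl⟩ := pvMem_charSet x h hx
  have h1 : PySem.Str.isIn (pvOne c) h = true := (pvIsIn_one c h).mpr hc
  simp only [List.all_cons, h1, Bool.true_and, pvContains_charSet]

theorem pvIacc_append_one (cur : List String) (line : String) :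
    pvIacc none (cur ++ [line]) =
      (match pvIacc none cur with
       | none => some (pvCharSet line)
       | some s => some (PySem.Set.inter s (pvCharSet line))) := by
  rw [pvIacc, List.foldl_append]
  rfl

theorem pvMain (rest : List String) (bl : List (List String)) (cur : List String)
    (hok : pvNoEmpty cur.isEmpty rest) :
    (rest.foldl pvBStep (bl.map pvGroupA, pvIacc none cur)).1
      = ((rest.foldl pvAStep (bl, cur)).1).map pvGroupA := by
  induction rest generalizing bl cur with
  | nil => simp
  | cons line rs ih =>
    by_cases hline : line = ""
    · subst hline
      simp only [pvNoEmpty, if_true] at hok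
      obtain ⟨hb, hok⟩ := hok
      obtain ⟨h, t, rfl⟩ : ∃ h t, cur = h :: t := by
        cases cur with
        | nil => simp at hb
        | cons h t => exact ⟨h, t, rfl⟩
      rw [List.foldl_cons, List.foldl_cons]
      have hB : pvBStep (bl.map pvGroupA, pvIacc none (h :: t)) ""
          = ((bl ++ [h :: t]).map pvGroupA, pvIacc none ([] : List String)) := by
        rw [pvGroup_eq]
        simp [pvBStep, pvIacc]
      have hA : pvAStep (bl, h :: t) "" = (bl ++ [h :: t], []) := by simp [pvAStep]
      rw [hB, hA]
      exact ih (bl ++ [h :: t]) [] (by simpa using hok)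
    · simp only [pvNoEmpty, if_neg hline] at hok
      rw [List.foldl_cons, List.foldl_cons]
      have hB : pvBStep (bl.map pvGroupA, pvIacc none cur) line
          = (bl.map pvGroupA, pvIacc none (cur ++ [line])) := by
        rw [pvIacc_append_one cur line]
        cases pvIacc none cur <;> simp [pvBStep, hline]
      have hA : pvAStep (bl, cur) line = (bl, cur ++ [line]) := by simp [pvAStep, hline]
      rw [hB, hA]
      have : (cur ++ [line]).isEmpty = false := by simp
      exact ih bl (cur ++ [line]) (this ▸ hok)

theorem pvPre_ok (input : List String) (hc : ∀ p ∈ input.zip input.tail, p.2 = "" → p.1 ≠ "")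
    (b : Bool) (hb : b = true → input.head? ≠ some "") : pvNoEmpty b input := by
  induction input generalizing b with
  | nil => trivial
  | cons line rs ih =>
    by_cases hline : line = ""
    · subst hline
      have hbf : b = false := by
        cases b with
        | false => rfl
        | true => exact absurd rfl (hb rfl)
      simp only [pvNoEmpty, if_true, hbf, true_and]
      apply ih
      · intro p hp
        apply hc
        cases rs with
        | nil => simp at hp
        | cons c rs' => simpa [List.zip] using Or.inr hp
      · intro _
        cases rs with
        | nil => simp
        | cons c rs' =>
          have := hc ("", c) (by simp [List.zip])
          simp only [List.head?, ne_eq, Option.some.injEq]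
          intro hcc
          exact (this hcc) rfl
    · simp only [pvNoEmpty, if_neg hline]
      apply ih
      · intro p hp
        apply hc
        cases rs with
        | nil => simp at hp
        | cons c rs' => simpa [List.zip] using Or.inr hp
      · simp

-- ===== VERDICT (by name: the statement is the Claim_ definition above) =====
theorem processInput2_spec : Claim_equal_processInput2 := by
  intro input _ hpre
  have hok : pvNoEmpty true input := pvPre_ok input hpre.2 true (fun _ => hpre.1)
  have hm := pvMain input [] [] (by exact hok)
  simp only [List.map_nil] at hm
  unfold Spec_processInput2 processInput2 processInput2_alt
  rw [PySem.List.foldl_append_singleton_eq_map, List.nil_append]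
  exact (hm.trans rfl).symm
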